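-- pv_equiv track=rewrite | github.com/JeangyuHeo/Algorithm | 구현/백준_종이접기.py | check_bending
-- ===== SOURCE A (Python) =====
-- def check_bending(paper:str):
--     while len(paper) >= 3:
--         for i in range(2, len(paper), 2):
--             if paper[i-2] == paper[i]:
--                 return False
--
--         next_paper = ""
--         for i in range(1, len(paper), 2):
--             next_paper+=paper[i]
--
--         paper = next_paper
--     return True
-- ===== SOURCE B (Python) =====
-- def check_bending(paper: str):
--     # Index arithmetic over the original string: logical position j at the
--     # current folding level lives at original index off + j*step.
--     m = len(paper)
--     off = 0
--     step = 1
--     while m >= 3: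
--         for i in range(2, m, 2):
--             if paper[off + (i - 2) * step] == paper[off + i * step]:
--                 return False
--         off += step
--         step *= 2
--         m //= 2
--     return True
-- ===== Notes on version B (the rewrite author's own statement) =====
-- stated objective: alternative
-- what changed: B never rebuilds the halved string: it keeps the original paper and walks folding levels with integer state (offset, stride, logical length), comparing characters at computed original indices, instead of A's repeated construction of next_paper by string concatenation.
import Mathlib
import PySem

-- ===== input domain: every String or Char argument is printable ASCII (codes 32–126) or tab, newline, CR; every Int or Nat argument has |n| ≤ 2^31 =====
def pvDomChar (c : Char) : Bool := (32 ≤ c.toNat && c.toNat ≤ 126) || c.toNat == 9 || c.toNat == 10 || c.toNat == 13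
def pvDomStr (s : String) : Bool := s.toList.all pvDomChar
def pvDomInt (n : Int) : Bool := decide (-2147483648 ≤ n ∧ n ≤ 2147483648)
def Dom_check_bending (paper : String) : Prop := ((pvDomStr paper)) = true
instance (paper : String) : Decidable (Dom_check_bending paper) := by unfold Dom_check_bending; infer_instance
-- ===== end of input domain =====

-- B keeps the original string and tracks folding levels by (offset, stride, length) index
-- arithmetic instead of A's rebuilding of the halved string each pass (alternative decomposition).


-- ===== PORT A =====
-- the while loop: every index used (i-2, i with 2 ≤ i < len, and the odd i < len)
-- is in range, so the Python indexing never raises; pyGetD with ' ' is exact here.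
def checkALoop (cs : List Char) : Bool :=
  if _h : 3 ≤ cs.length then
    if (PySem.List.pyRange 2 (cs.length : Int) 2).any
        (fun i => PySem.List.pyGetD cs (i - 2) ' ' == PySem.List.pyGetD cs i ' ') then
      false
    else
      checkALoop ((PySem.List.pyRange 1 (cs.length : Int) 2).foldl
        (fun acc i => acc ++ [PySem.List.pyGetD cs i ' ']) [])
  else
    true
termination_by cs.length
decreasing_by
  rw [PySem.List.foldl_append_singleton_eq_map,
      PySem.List.pyRange_of_pos 1 (cs.length : Int) (by decide : (0 : Int) < 2)]
  simp only [List.nil_append, List.length_map, List.length_range]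
  split <;> omega

def check_bending (paper : String) : Bool := checkALoop paper.toList

-- ===== PORT B =====
def checkBLoop (cs : List Char) (off st m : Nat) : Bool :=
  if 3 ≤ m then
    if (PySem.List.pyRange 2 (m : Int) 2).any
        (fun i => PySem.List.pyGetD cs ((off : Int) + (i - 2) * st) ' '
               == PySem.List.pyGetD cs ((off : Int) + i * st) ' ') then
      false
    else
      checkBLoop cs (off + st) (st * 2) (m / 2)
  else
    true
termination_by m
decreasing_by omega

def check_bending_alt (paper : String) : Bool :=
  checkBLoop paper.toList 0 1 paper.toList.length

-- ===== PRECONDITION & SPEC =====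
def Spec_check_bending (paper : String) (out : Bool) : Prop := out = check_bending_alt paper
instance (paper : String) (out : Bool) : Decidable (Spec_check_bending paper out) := by unfold Spec_check_bending; infer_instance

-- ===== CLAIM (what is proved, stated in full; the proofs are below) =====
def Claim_equal_check_bending : Prop := ∀ (paper : String), Dom_check_bending paper → Spec_check_bending paper (check_bending paper)

-- ===== LEMMAS AND PROOFS =====

-- the logical string B's state (off, st, m) denotes
def pvView (cs : List Char) (off st m : Nat) : List Char :=
  (List.range m).map (fun (j : Nat) =>
    PySem.List.pyGetD cs ((off : Int) + (j : Int) * (st : Int)) ' ')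

lemma pvView_length (cs : List Char) (off st m : Nat) : (pvView cs off st m).length = m := by
  simp [pvView]

lemma pvView_get (cs : List Char) (off st m j : Nat) (h : j < m) :
    PySem.List.pyGetD (pvView cs off st m) (j : Int) ' '
      = PySem.List.pyGetD cs ((off : Int) + (j : Int) * (st : Int)) ' ' := by
  rw [PySem.List.pyGetD_natCast, pvView, List.getD_eq_getElem?_getD, List.getElem?_map]
  rw [List.getElem?_range h]
  rfl

lemma pvView_self (cs : List Char) : pvView cs 0 1 cs.length = cs := by
  rw [pvView]
  have h1 : (List.range cs.length).map (fun (j : Nat) =>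
        PySem.List.pyGetD cs (((0 : Nat) : Int) + (j : Int) * ((1 : Nat) : Int)) ' ')
      = (List.range cs.length).map
          ((fun (i : Int) => PySem.List.pyGetD cs i ' ') ∘ (fun (k : Nat) => (k : Int))) := by
    apply List.map_congr_left
    intro j _
    simp only [Function.comp_apply]
    congr 1
    push_cast
    ring
  rw [h1, ← List.map_map, ← PySem.List.pyRange_zero_nat, ← PySem.List.len_eq]
  exact PySem.List.map_pyGetD_pyRange_zero cs ' '

lemma pvLoop_eq (m : Nat) : ∀ (cs : List Char) (off st : Nat),
    checkALoop (pvView cs off st m) = checkBLoop cs off st m := by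
  induction m using Nat.strong_induction_on with
  | _ m ih =>
    intro cs off st
    rw [checkALoop.eq_def, checkBLoop.eq_def, pvView_length]
    by_cases h3 : 3 ≤ m
    · rw [dif_pos h3, if_pos h3]
      have hany :
          (PySem.List.pyRange 2 (m : Int) 2).any
              (fun i => PySem.List.pyGetD (pvView cs off st m) (i - 2) ' '
                     == PySem.List.pyGetD (pvView cs off st m) i ' ')
            = (PySem.List.pyRange 2 (m : Int) 2).any
              (fun i => PySem.List.pyGetD cs ((off : Int) + (i - 2) * st) ' '
                     == PySem.List.pyGetD cs ((off : Int) + i * st) ' ') := by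
        apply PySem.List.any_congr_mem
        intro i hi
        rw [PySem.List.mem_pyRange_iff_of_pos (by decide)] at hi
        obtain ⟨j, rfl⟩ : ∃ j : Nat, i = (j : Int) := ⟨i.toNat, by omega⟩
        have e1 : (j : Int) - 2 = ((j - 2 : Nat) : Int) := by omega
        rw [e1, pvView_get cs off st m (j - 2) (by omega),
            pvView_get cs off st m j (by omega)]
      rw [hany]
      by_cases hb : (PySem.List.pyRange 2 (m : Int) 2).any
              (fun i => PySem.List.pyGetD cs ((off : Int) + (i - 2) * st) ' '
                     == PySem.List.pyGetD cs ((off : Int) + i * st) ' ') = true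
      · rw [if_pos hb, if_pos hb]
      · rw [if_neg hb, if_neg hb]
        have hnext :
            (PySem.List.pyRange 1 (m : Int) 2).foldl
              (fun acc i => acc ++ [PySem.List.pyGetD (pvView cs off st m) i ' ']) []
              = pvView cs (off + st) (st * 2) (m / 2) := by
          rw [PySem.List.foldl_append_singleton_eq_map, List.nil_append,
              PySem.List.pyRange_of_pos 1 (m : Int) (by decide : (0 : Int) < 2), List.map_map]
          have hn : (if (1 : Int) < (m : Int) then (((m : Int) - 1 + 2 - 1) / 2).toNat else 0)
              = m / 2 := by
            rw [if_pos (by exact_mod_cast (by omega : 1 < m))]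
            omega
          rw [hn]
          conv_rhs => rw [pvView]
          apply List.map_congr_left
          intro k hk
          rw [List.mem_range] at hk
          simp only [Function.comp_apply]
          have e : (1 : Int) + 2 * (k : Int) = ((1 + 2 * k : Nat) : Int) := by push_cast; ring
          rw [e, pvView_get cs off st m (1 + 2 * k) (by omega)]
          congr 1
          push_cast
          ring
        rw [hnext]
        exact ih (m / 2) (by omega) cs (off + st) (st * 2)
    · rw [dif_neg h3, if_neg h3]

-- ===== VERDICT (by name: the statement is the Claim_ definition above) =====
theorem check_bending_spec : Claim_equal_check_bending := by
  intro paper _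
  unfold Spec_check_bending check_bending check_bending_alt
  rw [← pvLoop_eq paper.toList.length paper.toList 0 1, pvView_self]
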